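-- pv_equiv track=rewrite | github.com/CityChan/leetcode | my-folder/2419-subarray-with-elements-greater-than-varying-threshold/solution.py | validSubarraySize
-- ===== SOURCE A (Python) =====
-- from typing import List
--
-- def validSubarraySize(nums: List[int], threshold: int) -> int:
--     n = len(nums)
--     left, st = [-1]*n, []
--     for i,v in enumerate(nums):
--         while st and nums[st[-1]] >= v: st.pop()
--         if st: left[i] = st[-1]
--         st.append(i)
--
--     right, st = [n]*n, []
--     for j in range(n-1, -1, -1):
--         while st and nums[st[-1]] >= nums[j]: st.pop()
--         if st: right[j] = st[-1]
--         st.append(j)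
--
--     for num, l, r in zip(nums, left, right):
--         k = r - l -1
--         if num > threshold // k:
--             return k
--     return -1
-- ===== SOURCE B (Python) =====
-- def validSubarraySize(nums, threshold):
--     n = len(nums)
--     left = [-1] * n
--     for i, v in enumerate(nums):
--         l = i - 1
--         while l >= 0 and nums[l] >= v:
--             l = left[l]
--         left[i] = l
--     right = [n] * n
--     for i in range(n - 1, -1, -1):
--         v = nums[i]
--         r = i + 1
--         while r < n and nums[r] >= v:
--             r = right[r]
--         right[i] = r
--     for i, v in enumerate(nums):
--         k = right[i] - left[i] - 1
--         if v > threshold // k: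
--             return k
--     return -1
-- ===== Notes on version B (the rewrite author's own statement) =====
-- stated objective: alternative
-- what changed: Replaced A's two explicit monotonic-stack passes by pointer-jumping: each index finds its nearest strictly smaller neighbour by hopping through the already-computed answers of the elements it skips, so no stack is ever maintained.
import Mathlib
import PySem

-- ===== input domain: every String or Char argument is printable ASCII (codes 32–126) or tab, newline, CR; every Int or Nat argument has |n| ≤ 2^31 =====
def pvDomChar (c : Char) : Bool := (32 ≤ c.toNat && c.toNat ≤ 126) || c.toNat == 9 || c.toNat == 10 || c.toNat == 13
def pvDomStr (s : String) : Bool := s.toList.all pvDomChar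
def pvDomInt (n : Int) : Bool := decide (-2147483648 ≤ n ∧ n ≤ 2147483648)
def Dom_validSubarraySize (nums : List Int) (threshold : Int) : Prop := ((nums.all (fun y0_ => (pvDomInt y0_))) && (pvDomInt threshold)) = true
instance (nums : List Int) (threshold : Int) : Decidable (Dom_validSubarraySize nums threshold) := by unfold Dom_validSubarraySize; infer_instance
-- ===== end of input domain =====

-- B replaces A's two monotonic-stack passes by pointer-jumping: each index finds its nearest
-- strictly smaller neighbour by hopping through already-computed answers; no stack is kept.

-- ===== PORT A =====
-- `while st and nums[st[-1]] >= v: st.pop()`; stack entries are always valid indices,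
-- so `nums.getD t 0` is exact for Python's `nums[st[-1]]`.
def popA (nums : List Int) (v : Int) : List Nat → List Nat
  | [] => []
  | t :: st => if v ≤ nums.getD t 0 then popA nums v st else t :: st

-- the shared body of A's two stack loops (they are textually identical up to direction)
def stackStep (nums : List Int) (s : List Int × List Nat) (i : Nat) : List Int × List Nat :=
  let st := popA nums (nums.getD i 0) s.2
  (match st.head? with
   | some t => s.1.set i (Int.ofNat t)
   | none => s.1,
   i :: st)

def finalLoop (threshold : Int) : List (Int × Int × Int) → Int
  | [] => -1
  | (num, l, r) :: rest =>
    let k := r - l - 1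
    if PySem.Int.floordiv threshold k < num then k else finalLoop threshold rest

-- `range(n-1, -1, -1)` is `(List.range n).reverse`
def validSubarraySize (nums : List Int) (threshold : Int) : Int :=
  let n := nums.length
  let left := ((List.range n).foldl (stackStep nums) (List.replicate n (-1), [])).1
  let right := (((List.range n).reverse).foldl (stackStep nums) (List.replicate n (Int.ofNat n), [])).1
  finalLoop threshold (nums.zip (left.zip right))

-- ===== PORT B =====
-- `l = i-1; while l >= 0 and nums[l] >= v: l = left[l]`.  The fuel argument only makes the
-- loop total; fuel i is enough since each jump strictly decreases l (proved below).
def jumpL (nums : List Int) (left : List Int) (v : Int) : Nat → Int → Int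
  | 0, l => l
  | fuel + 1, l =>
    if 0 ≤ l ∧ v ≤ nums.getD l.toNat 0 then jumpL nums left v fuel (left.getD l.toNat 0)
    else l

def buildL (nums : List Int) : List Int :=
  (List.range nums.length).foldl
    (fun left i => left.set i (jumpL nums left (nums.getD i 0) i ((i : Int) - 1)))
    (List.replicate nums.length (-1))

-- `r = i+1; while r < n and nums[r] >= v: r = right[r]`; fuel n-i is enough (r strictly grows)
def jumpR (nums : List Int) (right : List Int) (v : Int) : Nat → Int → Int
  | 0, r => r
  | fuel + 1, r =>
    if r < (nums.length : Int) ∧ v ≤ nums.getD r.toNat 0 then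
      jumpR nums right v fuel (right.getD r.toNat 0)
    else r

def buildR (nums : List Int) : List Int :=
  ((List.range nums.length).reverse).foldl
    (fun right i =>
      right.set i (jumpR nums right (nums.getD i 0) (nums.length - i) ((i : Int) + 1)))
    (List.replicate nums.length (Int.ofNat nums.length))

def altFinal (nums : List Int) (threshold : Int) (left right : List Int) : List Nat → Int
  | [] => -1
  | i :: rest =>
    let k := right.getD i 0 - left.getD i 0 - 1
    if PySem.Int.floordiv threshold k < nums.getD i 0 then k
    else altFinal nums threshold left right rest

def validSubarraySize_alt (nums : List Int) (threshold : Int) : Int :=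
  altFinal nums threshold (buildL nums) (buildR nums) (List.range nums.length)

-- ===== PRECONDITION & SPEC =====
def Spec_validSubarraySize (nums : List Int) (threshold : Int) (out : Int) : Prop := out = validSubarraySize_alt nums threshold
instance (nums : List Int) (threshold : Int) (out : Int) : Decidable (Spec_validSubarraySize nums threshold out) := by unfold Spec_validSubarraySize; infer_instance

-- ===== CLAIM (what is proved, stated in full; the proofs are below) =====
def Claim_equal_validSubarraySize : Prop := ∀ (nums : List Int) (threshold : Int), Dom_validSubarraySize nums threshold → Spec_validSubarraySize nums threshold (validSubarraySize nums threshold)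

-- ===== LEMMAS AND PROOFS =====

-- the pure stack component of A's folds
def Stk (nums : List Int) (ord : List Nat) : List Nat :=
  ord.foldl (fun st i => i :: popA nums (nums.getD i 0) st) []

-- what A writes into left/right at an index whose processed-before order list is `ord`
def aAns (nums : List Int) (v : Int) (ord : List Nat) : Option Nat :=
  (popA nums v (Stk nums ord)).head?

lemma Stk_append (nums : List Int) (ord : List Nat) (i : Nat) :
    Stk nums (ord ++ [i]) = i :: popA nums (nums.getD i 0) (Stk nums ord) := by
  simp [Stk, List.foldl_append]

lemma popA_eq_filter (nums : List Int) (v : Int) (st : List Nat)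
    (h : st.Pairwise (fun a b => nums.getD b 0 < nums.getD a 0)) :
    popA nums v st = st.filter (fun t => decide (nums.getD t 0 < v)) := by
  induction st with
  | nil => rfl
  | cons t rest ih =>
    rcases List.pairwise_cons.mp h with ⟨ht, hrest⟩
    simp only [popA, List.filter_cons]
    by_cases hv : v ≤ nums.getD t 0
    · have hnlt : decide (nums.getD t 0 < v) = false := decide_eq_false (not_lt.mpr hv)
      rw [if_pos hv, hnlt, ih hrest]
      simp
    · have hlt : decide (nums.getD t 0 < v) = true := decide_eq_true (lt_of_not_ge hv)
      have hrest' : rest.filter (fun t => decide (nums.getD t 0 < v)) = rest :=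
        List.filter_eq_self.mpr (fun a ha => by simpa using lt_trans (ht a ha) (lt_of_not_ge hv))
      rw [if_neg hv, hlt, hrest']
      simp

lemma stk_inv (nums : List Int) (r : Nat → Nat → Prop)
    (hirr : ∀ a, ¬ r a a) (htr : ∀ a b c, r a b → r b c → r a c)
    (ord : List Nat) (hord : ord.Pairwise r) :
    ((Stk nums ord).Pairwise (fun a b => r b a ∧ nums.getD b 0 < nums.getD a 0))
    ∧ (∀ j, j ∈ Stk nums ord ↔ (j ∈ ord ∧ ∀ j' ∈ ord, r j j' → nums.getD j 0 < nums.getD j' 0))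
    ∧ (∀ j ∈ ord, ∃ jm ∈ Stk nums ord, (jm = j ∨ r j jm) ∧ nums.getD jm 0 ≤ nums.getD j 0) := by
  induction ord using List.reverseRecOn with
  | nil => simp [Stk]
  | append_singleton ord i ih =>
    rcases List.pairwise_append.mp hord with ⟨h1, _, h3⟩
    have hri : ∀ a ∈ ord, r a i := fun a ha => h3 a ha i (by simp)
    obtain ⟨hpw, hmem, hdom⟩ := ih h1
    have hpw' : (Stk nums ord).Pairwise (fun a b => nums.getD b 0 < nums.getD a 0) :=
      hpw.imp (fun h => h.2)
    have hstk : Stk nums (ord ++ [i])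
        = i :: (Stk nums ord).filter (fun t => decide (nums.getD t 0 < nums.getD i 0)) := by
      rw [Stk_append, popA_eq_filter nums _ _ hpw']
    have hfmem : ∀ t, t ∈ (Stk nums ord).filter (fun t => decide (nums.getD t 0 < nums.getD i 0)) ↔
        t ∈ Stk nums ord ∧ nums.getD t 0 < nums.getD i 0 := by
      intro t; simp [List.mem_filter]
    refine ⟨?_, ?_, ?_⟩
    · rw [hstk]
      refine List.pairwise_cons.mpr ⟨?_, List.Pairwise.sublist List.filter_sublist hpw⟩
      intro b hb
      rcases (hfmem b).mp hb with ⟨hbst, hblt⟩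
      exact ⟨hri b ((hmem b).mp hbst).1, hblt⟩
    · intro j
      rw [hstk]
      constructor
      · intro hj
        rcases List.mem_cons.mp hj with rfl | hj
        · refine ⟨by simp, ?_⟩
          intro j' hj' hrij'
          rcases List.mem_append.mp hj' with hj'o | hj's
          · exact absurd (htr _ _ _ hrij' (hri j' hj'o)) (hirr _)
          · have hji : j' = j := by simpa using hj's
            subst hji; exact absurd hrij' (hirr _)
        · rcases (hfmem j).mp hj with ⟨hjst, hjlt⟩
          rcases (hmem j).mp hjst with ⟨hjo, hjp⟩
          refine ⟨by simp [hjo], ?_⟩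
          intro j' hj' hrjj'
          rcases List.mem_append.mp hj' with hj'o | hj's
          · exact hjp j' hj'o hrjj'
          · have hji : j' = i := by simpa using hj's
            subst hji; exact hjlt
      · rintro ⟨hj, hjp⟩
        rcases List.mem_append.mp hj with hjo | hjs
        · refine List.mem_cons.mpr (Or.inr ?_)
          refine (hfmem j).mpr ⟨(hmem j).mpr ⟨hjo, ?_⟩, ?_⟩
          · intro j' hj'o hr'; exact hjp j' (List.mem_append.mpr (Or.inl hj'o)) hr'
          · exact hjp i (by simp) (hri j hjo)
        · have hji : j = i := by simpa using hjs
          subst hji; exact List.mem_cons_self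
    · intro j hj
      rcases List.mem_append.mp hj with hjo | hjs
      · obtain ⟨jm, hjmst, hjmd, hjmle⟩ := hdom j hjo
        by_cases hlt : nums.getD jm 0 < nums.getD i 0
        · exact ⟨jm, by rw [hstk]; exact List.mem_cons.mpr (Or.inr ((hfmem jm).mpr ⟨hjmst, hlt⟩)),
            hjmd, hjmle⟩
        · exact ⟨i, by rw [hstk]; exact List.mem_cons_self, Or.inr (hri j hjo),
            le_trans (not_lt.mp hlt) hjmle⟩
      · have hji : j = i := by simpa using hjs
        subst hji
        exact ⟨j, by rw [hstk]; exact List.mem_cons_self, Or.inl rfl, le_refl _⟩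

lemma aAns_none (nums : List Int) (r : Nat → Nat → Prop)
    (hirr : ∀ a, ¬ r a a) (htr : ∀ a b c, r a b → r b c → r a c)
    (ord : List Nat) (hord : ord.Pairwise r) (v : Int) :
    aAns nums v ord = none ↔ ∀ j ∈ ord, v ≤ nums.getD j 0 := by
  obtain ⟨hpw, hmem, hdom⟩ := stk_inv nums r hirr htr ord hord
  have hpw' : (Stk nums ord).Pairwise (fun a b => nums.getD b 0 < nums.getD a 0) :=
    hpw.imp (fun h => h.2)
  rw [aAns, popA_eq_filter nums v _ hpw', List.head?_eq_none_iff, List.filter_eq_nil_iff]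
  constructor
  · intro h j hj
    by_contra hlt
    push_neg at hlt
    obtain ⟨jm, hjm, _, hle⟩ := hdom j hj
    exact h jm hjm (by simpa using lt_of_le_of_lt hle hlt)
  · intro h t ht
    simpa using not_lt.mpr (h t ((hmem t).mp ht).1)

lemma aAns_some (nums : List Int) (r : Nat → Nat → Prop)
    (hirr : ∀ a, ¬ r a a) (htr : ∀ a b c, r a b → r b c → r a c)
    (ord : List Nat) (hord : ord.Pairwise r)
    (v : Int) (j : Nat) :
    aAns nums v ord = some j ↔
      (j ∈ ord ∧ nums.getD j 0 < v ∧ ∀ j' ∈ ord, r j j' → v ≤ nums.getD j' 0) := by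
  obtain ⟨hpw, hmem, hdom⟩ := stk_inv nums r hirr htr ord hord
  have hpw' : (Stk nums ord).Pairwise (fun a b => nums.getD b 0 < nums.getD a 0) :=
    hpw.imp (fun h => h.2)
  have hfpw : ((Stk nums ord).filter (fun t => decide (nums.getD t 0 < v))).Pairwise
      (fun a b => r b a ∧ nums.getD b 0 < nums.getD a 0) :=
    List.Pairwise.sublist List.filter_sublist hpw
  have hfmem : ∀ t, t ∈ (Stk nums ord).filter (fun t => decide (nums.getD t 0 < v)) ↔
      t ∈ Stk nums ord ∧ nums.getD t 0 < v := by
    intro t; simp [List.mem_filter]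
  rw [aAns, popA_eq_filter nums v _ hpw']
  constructor
  · intro h
    cases hf : (Stk nums ord).filter (fun t => decide (nums.getD t 0 < v)) with
    | nil => rw [hf] at h; simp at h
    | cons a tl =>
      rw [hf] at h
      have haj : a = j := by simpa using h
      subst haj
      have haf : a ∈ (Stk nums ord).filter (fun t => decide (nums.getD t 0 < v)) := by
        rw [hf]; exact List.mem_cons_self
      rcases (hfmem a).mp haf with ⟨hast, halt⟩
      rcases (hmem a).mp hast with ⟨hao, _⟩
      refine ⟨hao, halt, ?_⟩
      intro j' hj'o hrjj'
      by_contra hcon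
      push_neg at hcon
      obtain ⟨jm, hjmst, hjmd, hjmle⟩ := hdom j' hj'o
      have hjmf : jm ∈ (Stk nums ord).filter (fun t => decide (nums.getD t 0 < v)) :=
        (hfmem jm).mpr ⟨hjmst, lt_of_le_of_lt hjmle hcon⟩
      have hrajm : r a jm := by
        rcases hjmd with rfl | hr
        · exact hrjj'
        · exact htr _ _ _ hrjj' hr
      rw [hf] at hjmf
      rcases List.mem_cons.mp hjmf with rfl | hjmtl
      · exact hirr _ hrajm
      · have := (List.pairwise_cons.mp (hf ▸ hfpw)).1 jm hjmtl
        exact hirr _ (htr _ _ _ hrajm this.1)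
  · rintro ⟨hjo, hjlt, hmin⟩
    have hjstk : j ∈ Stk nums ord :=
      (hmem j).mpr ⟨hjo, fun j' hj' hr' => lt_of_lt_of_le hjlt (hmin j' hj' hr')⟩
    have hjf : j ∈ (Stk nums ord).filter (fun t => decide (nums.getD t 0 < v)) :=
      (hfmem j).mpr ⟨hjstk, hjlt⟩
    cases hf : (Stk nums ord).filter (fun t => decide (nums.getD t 0 < v)) with
    | nil => rw [hf] at hjf; simp at hjf
    | cons a tl =>
      rw [hf] at hjf
      rcases List.mem_cons.mp hjf with rfl | hjtl
      · rfl
      · have hja := (List.pairwise_cons.mp (hf ▸ hfpw)).1 j hjtl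
        have haf : a ∈ (Stk nums ord).filter (fun t => decide (nums.getD t 0 < v)) := by
          rw [hf]; exact List.mem_cons_self
        rcases (hfmem a).mp haf with ⟨hast, halt⟩
        have hao : a ∈ ord := ((hmem a).mp hast).1
        exact absurd halt (not_lt.mpr (hmin a hao hja.1))


-- straight-line scan specifications: nearest strictly-smaller index on each side;
-- both A's stack answers and B's jump answers are proved equal to these
def scanL (nums : List Int) (v : Int) : Nat → Int
  | 0 => -1
  | l + 1 => if v ≤ nums.getD l 0 then scanL nums v l else Int.ofNat l

def scanR (nums : List Int) (n : Nat) (v : Int) (r : Nat) : Int :=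
  if h : r < n then
    if v ≤ nums.getD r 0 then scanR nums n v (r + 1) else Int.ofNat r
  else Int.ofNat n
termination_by n - r

lemma scanL_all (nums : List Int) (v : Int) :
    ∀ i, (∀ j, j < i → v ≤ nums.getD j 0) → scanL nums v i = -1 := by
  intro i
  induction i with
  | zero => intro _; rfl
  | succ l ih =>
    intro h
    rw [scanL, if_pos (h l (Nat.lt_succ_self l))]
    exact ih (fun j hj => h j (Nat.lt_succ_of_lt hj))

lemma scanL_found (nums : List Int) (v : Int) (j : Nat) :
    ∀ i, j < i → nums.getD j 0 < v → (∀ j', j < j' → j' < i → v ≤ nums.getD j' 0) →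
    scanL nums v i = Int.ofNat j := by
  intro i
  induction i with
  | zero => intro h; exact absurd h (Nat.not_lt_zero j)
  | succ l ih =>
    intro hj hlt hmin
    by_cases hjl : j = l
    · subst hjl; rw [scanL, if_neg (not_le.mpr hlt)]
    · have hjl' : j < l := by omega
      rw [scanL, if_pos (hmin l hjl' (Nat.lt_succ_self l))]
      exact ih hjl' hlt (fun j' h1 h2 => hmin j' h1 (by omega))

lemma scanR_all (nums : List Int) (n : Nat) (v : Int) :
    ∀ k r0, n - r0 = k → (∀ t, r0 ≤ t → t < n → v ≤ nums.getD t 0) →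
    scanR nums n v r0 = Int.ofNat n := by
  intro k
  induction k with
  | zero =>
    intro r0 hk _
    rw [scanR, dif_neg (by omega)]
  | succ k ih =>
    intro r0 hk h
    have hr : r0 < n := by omega
    rw [scanR, dif_pos hr, if_pos (h r0 le_rfl hr)]
    exact ih (r0 + 1) (by omega) (fun t ht1 ht2 => h t (by omega) ht2)

lemma scanR_found (nums : List Int) (n : Nat) (v : Int) (j : Nat) (hj : j < n)
    (hlt : nums.getD j 0 < v) :
    ∀ k r0, j - r0 = k → r0 ≤ j → (∀ t, r0 ≤ t → t < j → v ≤ nums.getD t 0) →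
    scanR nums n v r0 = Int.ofNat j := by
  intro k
  induction k with
  | zero =>
    intro r0 hk hr0 _
    have hrj : r0 = j := by omega
    subst hrj
    rw [scanR, dif_pos hj, if_neg (not_le.mpr hlt)]
  | succ k ih =>
    intro r0 hk hr0 h
    have hr0j : r0 < j := by omega
    rw [scanR, dif_pos (by omega), if_pos (h r0 le_rfl hr0j)]
    exact ih (r0 + 1) (by omega) (by omega) (fun t ht1 ht2 => h t (by omega) ht2)

-- the indices processed before index n-1-t in A's second (right-to-left) pass
def ordR (n t : Nat) : List Nat := ((List.range n).reverse).take t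

lemma ordR_succ (n t : Nat) (h : t < n) : ordR n (t + 1) = ordR n t ++ [n - 1 - t] := by
  unfold ordR
  rw [List.take_add_one]
  have hlen : t < ((List.range n).reverse).length := by simpa using h
  rw [List.getElem?_eq_getElem hlen]
  simp [List.getElem_reverse]

lemma ordR_mem (n : Nat) : ∀ t, t ≤ n → ∀ j, (j ∈ ordR n t ↔ n - t ≤ j ∧ j < n) := by
  intro t
  induction t with
  | zero =>
    intro _ j
    simp only [ordR, List.take_zero, List.mem_nil_iff, false_iff]
    omega
  | succ t ih =>
    intro h j
    rw [ordR_succ n t (by omega), List.mem_append]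
    simp only [List.mem_singleton]
    rw [ih (by omega) j]
    omega

lemma ordR_pairwise (n : Nat) : ∀ t, t ≤ n → (ordR n t).Pairwise (fun a b => b < a) := by
  intro t
  induction t with
  | zero => intro _; simp [ordR]
  | succ t ih =>
    intro h
    rw [ordR_succ n t (by omega)]
    rw [List.pairwise_append]
    refine ⟨ih (by omega), by simp, ?_⟩
    intro a ha b hb
    have := (ordR_mem n t (by omega) a).mp ha
    have hb' : b = n - 1 - t := by simpa using hb
    omega

def valL (nums : List Int) (j : Nat) : Int :=
  match aAns nums (nums.getD j 0) (List.range j) with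
  | some t => Int.ofNat t
  | none => -1

def valR (nums : List Int) (n j : Nat) : Int :=
  match aAns nums (nums.getD j 0) (ordR n (n - 1 - j)) with
  | some t => Int.ofNat t
  | none => Int.ofNat n

lemma valL_eq_scanL (nums : List Int) (j : Nat) :
    valL nums j = scanL nums (nums.getD j 0) j := by
  have hirr : ∀ a : Nat, ¬ a < a := fun a => Nat.lt_irrefl a
  have htr : ∀ a b c : Nat, a < b → b < c → a < c := fun _ _ _ => Nat.lt_trans
  have hord : (List.range j).Pairwise (· < ·) := List.pairwise_lt_range
  unfold valL
  cases hh : aAns nums (nums.getD j 0) (List.range j) with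
  | none =>
    have h := (aAns_none nums (· < ·) hirr htr _ hord _).mp hh
    exact (scanL_all nums _ j (fun t ht => h t (List.mem_range.mpr ht))).symm
  | some t =>
    obtain ⟨h1, h2, h3⟩ := (aAns_some nums (· < ·) hirr htr _ hord _ t).mp hh
    rw [List.mem_range] at h1
    exact (scanL_found nums _ t j h1 h2
      (fun j' ha hb => h3 j' (List.mem_range.mpr hb) ha)).symm

lemma valR_eq_scanR (nums : List Int) (n j : Nat) :
    valR nums n j = scanR nums n (nums.getD j 0) (j + 1) := by
  have hirr : ∀ a : Nat, ¬ a < a := fun a => Nat.lt_irrefl a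
  have htr : ∀ a b c : Nat, b < a → c < b → c < a := fun _ _ _ h1 h2 => Nat.lt_trans h2 h1
  by_cases hjn : j < n
  · have ht : n - 1 - j ≤ n := by omega
    have hmem := ordR_mem n (n - 1 - j) ht
    have hmem' : ∀ j', j' ∈ ordR n (n - 1 - j) ↔ j + 1 ≤ j' ∧ j' < n := by
      intro j'; rw [hmem j']; omega
    have hord := ordR_pairwise n (n - 1 - j) ht
    unfold valR
    cases hh : aAns nums (nums.getD j 0) (ordR n (n - 1 - j)) with
    | none =>
      have h := (aAns_none nums (fun a b => b < a) hirr htr _ hord _).mp hh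
      exact (scanR_all nums n _ (n - (j + 1)) (j + 1) rfl
        (fun t ht1 ht2 => h t ((hmem' t).mpr ⟨ht1, ht2⟩))).symm
    | some t =>
      obtain ⟨h1, h2, h3⟩ := (aAns_some nums (fun a b => b < a) hirr htr _ hord _ t).mp hh
      rw [hmem' t] at h1
      exact (scanR_found nums n _ t h1.2 h2 (t - (j + 1)) (j + 1) rfl h1.1
        (fun t' ht1 ht2 => h3 t' ((hmem' t').mpr ⟨ht1, by omega⟩) ht2)).symm
  · have hz : n - 1 - j = 0 := by omega
    unfold valR
    rw [hz]
    have : aAns nums (nums.getD j 0) (ordR n 0) = none := rfl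
    rw [this]
    exact (scanR_all nums n _ (n - (j + 1)) (j + 1) rfl (fun t ht1 ht2 => by omega)).symm

lemma left_fold (nums : List Int) (n : Nat) : ∀ i, i ≤ n →
    (List.range i).foldl (stackStep nums) (List.replicate n (-1), []) =
    ((List.range n).map (fun j => if j < i then valL nums j else -1), Stk nums (List.range i)) := by
  intro i
  induction i with
  | zero =>
    intro _
    refine Prod.ext ?_ (by simp [Stk])
    simp only [List.range_zero, List.foldl_nil]
    apply List.ext_getElem
    · simp
    · intro k h1 h2; simp
  | succ i ih =>
    intro h
    rw [List.range_succ, List.foldl_append, ih (by omega), List.foldl_cons, List.foldl_nil]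
    have hstk : Stk nums (List.range (i + 1)) =
        i :: popA nums (nums.getD i 0) (Stk nums (List.range i)) := by
      rw [List.range_succ, Stk_append]
    unfold stackStep
    refine Prod.ext ?_ (show i :: popA nums (nums.getD i 0) (Stk nums (List.range i))
      = Stk nums (List.range i ++ [i]) by rw [Stk_append])
    simp only
    cases hh : (popA nums (nums.getD i 0) (Stk nums (List.range i))).head? with
    | some t =>
      have hvl : valL nums i = Int.ofNat t := by unfold valL aAns; rw [hh]
      apply List.ext_getElem
      · simp
      · intro k h1 h2
        rw [List.getElem_set]
        simp only [List.getElem_map, List.getElem_range]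
        by_cases hki : i = k
        · subst hki; rw [if_pos rfl, if_pos (by omega), hvl]
        · rw [if_neg hki]
          by_cases hki2 : k < i
          · rw [if_pos hki2, if_pos (by omega)]
          · rw [if_neg hki2, if_neg (by omega)]
    | none =>
      have hvl : valL nums i = -1 := by unfold valL aAns; rw [hh]
      apply List.ext_getElem
      · simp
      · intro k h1 h2
        simp only [List.getElem_map, List.getElem_range]
        by_cases hki : k = i
        · subst hki; rw [if_neg (lt_irrefl _), if_pos (by omega), hvl]
        · by_cases hki2 : k < i
          · rw [if_pos hki2, if_pos (by omega)]
          · rw [if_neg hki2, if_neg (by omega)]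

lemma right_fold (nums : List Int) (n : Nat) : ∀ t, t ≤ n →
    (((List.range n).reverse).take t).foldl (stackStep nums) (List.replicate n (Int.ofNat n), []) =
    ((List.range n).map (fun j => if n - t ≤ j then valR nums n j else Int.ofNat n),
      Stk nums (ordR n t)) := by
  intro t
  induction t with
  | zero =>
    intro _
    refine Prod.ext ?_ (by simp [Stk, ordR])
    simp only [List.take_zero, List.foldl_nil]
    apply List.ext_getElem
    · simp
    · intro k h1 h2
      have hkn : k < n := by simpa using h1
      have hno : ¬ n ≤ k := by omega
      simp [hno]
  | succ t ih =>
    intro h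
    have htn : t < n := h
    have hsplit : ((List.range n).reverse).take (t + 1) = ordR n t ++ [n - 1 - t] :=
      ordR_succ n t htn
    rw [show ((List.range n).reverse).take (t + 1) = ordR n t ++ [n - 1 - t] from hsplit]
    rw [show (((List.range n).reverse).take t) = ordR n t from rfl] at ih
    rw [List.foldl_append, ih (by omega), List.foldl_cons, List.foldl_nil]
    have hstk : Stk nums (ordR n (t + 1)) =
        (n - 1 - t) :: popA nums (nums.getD (n - 1 - t) 0) (Stk nums (ordR n t)) := by
      rw [ordR_succ n t htn, Stk_append]
    have hj0 : n - 1 - (n - 1 - t) = t := by omega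
    unfold stackStep
    refine Prod.ext ?_ (show (n - 1 - t) :: popA nums (nums.getD (n - 1 - t) 0)
        (Stk nums (ordR n t)) = Stk nums (ordR n (t + 1)) by rw [hstk])
    simp only
    cases hh : (popA nums (nums.getD (n - 1 - t) 0) (Stk nums (ordR n t))).head? with
    | some x =>
      have hvr : valR nums n (n - 1 - t) = Int.ofNat x := by
        unfold valR aAns; rw [hj0, hh]
      apply List.ext_getElem
      · simp
      · intro k h1 h2
        rw [List.getElem_set]
        simp only [List.getElem_map, List.getElem_range]
        by_cases hki : n - 1 - t = k
        · subst hki; rw [if_pos rfl, if_pos (by omega), hvr]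
        · rw [if_neg hki]
          by_cases hki2 : n - t ≤ k
          · rw [if_pos hki2, if_pos (by omega)]
          · rw [if_neg hki2, if_neg (by omega)]
    | none =>
      have hvr : valR nums n (n - 1 - t) = Int.ofNat n := by
        unfold valR aAns; rw [hj0, hh]
      apply List.ext_getElem
      · simp
      · intro k h1 h2
        simp only [List.getElem_map, List.getElem_range]
        by_cases hki : k = n - 1 - t
        · subst hki; rw [if_neg (by omega), if_pos (by omega), hvr]
        · by_cases hki2 : n - t ≤ k
          · rw [if_pos hki2, if_pos (by omega)]
          · rw [if_neg hki2, if_neg (by omega)]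

lemma getD_map_range (f : Nat → Int) (n i : Nat) (h : i < n) :
    ((List.range n).map f).getD i 0 = f i := by
  rw [List.getD_eq_getElem?_getD, List.getElem?_eq_getElem (by simpa using h)]
  simp

lemma scanL_skip (nums : List Int) (v : Int) :
    ∀ b a, a ≤ b → (∀ j, a ≤ j → j < b → v ≤ nums.getD j 0) →
    scanL nums v b = scanL nums v a := by
  intro b
  induction b with
  | zero =>
    intro a ha _
    have : a = 0 := by omega
    subst this; rfl
  | succ l ih =>
    intro a ha h
    by_cases hal : a = l + 1
    · subst hal; rfl
    · rw [scanL, if_pos (h l (by omega) (by omega))]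
      exact ih a (by omega) (fun j h1 h2 => h j h1 (by omega))

lemma scanL_cases (nums : List Int) (v : Int) :
    ∀ i, (scanL nums v i = -1 ∧ ∀ j, j < i → v ≤ nums.getD j 0)
      ∨ (∃ j, j < i ∧ scanL nums v i = Int.ofNat j ∧ nums.getD j 0 < v ∧
          ∀ j', j < j' → j' < i → v ≤ nums.getD j' 0) := by
  intro i
  induction i with
  | zero => exact Or.inl ⟨rfl, fun j hj => absurd hj (Nat.not_lt_zero j)⟩
  | succ l ih =>
    by_cases hc : v ≤ nums.getD l 0
    · rcases ih with ⟨heq, hall⟩ | ⟨j, hj, heq, hjlt, hbtw⟩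
      · refine Or.inl ⟨?_, ?_⟩
        · rw [scanL, if_pos hc]; exact heq
        · intro j hj
          by_cases hjl : j = l
          · subst hjl; exact hc
          · exact hall j (by omega)
      · refine Or.inr ⟨j, by omega, ?_, hjlt, ?_⟩
        · rw [scanL, if_pos hc]; exact heq
        · intro j' h1 h2
          by_cases hjl : j' = l
          · subst hjl; exact hc
          · exact hbtw j' h1 (by omega)
    · refine Or.inr ⟨l, by omega, ?_, lt_of_not_ge hc, fun j' h1 h2 => by omega⟩
      rw [scanL, if_neg hc]

lemma jumpL_eq (nums left : List Int) (v : Int) (iB : Nat)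
    (hl : ∀ j, j < iB → left.getD j 0 = scanL nums (nums.getD j 0) j) :
    ∀ fuel (l : Int), -1 ≤ l → l < (iB : Int) → (l + 1).toNat ≤ fuel →
    jumpL nums left v fuel l = scanL nums v (l + 1).toNat := by
  intro fuel
  induction fuel with
  | zero =>
    intro l h1 h2 h3
    have hm : l = -1 := by omega
    subst hm
    rfl
  | succ fuel ih =>
    intro l h1 h2 h3
    rw [jumpL]
    by_cases hneg : l = -1
    · subst hneg
      rw [if_neg (by intro hx; omega)]
      rfl
    · have hl0 : 0 ≤ l := by omega
      have hlv : l = (l.toNat : Int) := by omega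
      have htn : (l + 1).toNat = l.toNat + 1 := by omega
      have hlnB : l.toNat < iB := by omega
      by_cases hcond : v ≤ nums.getD l.toNat 0
      · rw [if_pos ⟨hl0, hcond⟩, hl l.toNat hlnB]
        rcases scanL_cases nums (nums.getD l.toNat 0) l.toNat with
          ⟨heq, hall⟩ | ⟨j, hj, heq, hjlt, hbtw⟩
        · rw [heq]
          have hskip : scanL nums v (l + 1).toNat = scanL nums v 0 := by
            apply scanL_skip
            · omega
            · intro j _ hjb
              rw [htn] at hjb
              by_cases hjl : j = l.toNat
              · subst hjl; exact hcond
              · exact le_trans hcond (hall j (by omega))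
          rw [hskip]
          have := ih (-1) (by omega) (by omega) (by omega)
          simpa using this
        · rw [Int.ofNat_eq_natCast] at heq
          rw [heq]
          have hskip : scanL nums v (l + 1).toNat = scanL nums v (j + 1) := by
            apply scanL_skip
            · omega
            · intro j' h1' h2'
              rw [htn] at h2'
              by_cases hjl : j' = l.toNat
              · subst hjl; exact hcond
              · exact le_trans hcond (hbtw j' (by omega) (by omega))
          rw [hskip]
          have := ih ((j : Int)) (by omega) (by omega) (by omega)
          have hcast : (((j : Int)) + 1).toNat = j + 1 := by omega
          rw [hcast] at this
          exact this
      · rw [if_neg (fun hx => hcond hx.2), htn, scanL, if_neg hcond]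
        omega

lemma buildL_inv (nums : List Int) (n : Nat) : ∀ i, i ≤ n →
    (List.range i).foldl
      (fun left i => left.set i (jumpL nums left (nums.getD i 0) i ((i : Int) - 1)))
      (List.replicate n (-1)) =
    (List.range n).map (fun j => if j < i then scanL nums (nums.getD j 0) j else -1) := by
  intro i
  induction i with
  | zero =>
    intro _
    apply List.ext_getElem
    · simp
    · intro k h1 h2; simp
  | succ i ih =>
    intro h
    rw [List.range_succ, List.foldl_append, ih (by omega), List.foldl_cons, List.foldl_nil]
    have hl : ∀ j, j < i →
        ((List.range n).map (fun j => if j < i then scanL nums (nums.getD j 0) j else -1)).getD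
          j 0 = scanL nums (nums.getD j 0) j := by
      intro j hj
      rw [getD_map_range _ n j (by omega), if_pos hj]
    have hjump := jumpL_eq nums _ (nums.getD i 0) i hl i ((i : Int) - 1)
      (by omega) (by omega) (by omega)
    have hcast : (((i : Int) - 1) + 1).toNat = i := by omega
    rw [hcast] at hjump
    rw [hjump]
    apply List.ext_getElem
    · simp
    · intro k h1 h2
      rw [List.getElem_set]
      simp only [List.getElem_map, List.getElem_range]
      by_cases hki : i = k
      · subst hki; rw [if_pos rfl, if_pos (by omega)]
      · rw [if_neg hki]
        by_cases hki2 : k < i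
        · rw [if_pos hki2, if_pos (by omega)]
        · rw [if_neg hki2, if_neg (by omega)]

lemma scanR_skip (nums : List Int) (n : Nat) (v : Int) :
    ∀ k a b, a ≤ b → b ≤ n → b - a = k → (∀ t, a ≤ t → t < b → v ≤ nums.getD t 0) →
    scanR nums n v a = scanR nums n v b := by
  intro k
  induction k with
  | zero =>
    intro a b h1 _ h3 _
    have : a = b := by omega
    subst this; rfl
  | succ k ih =>
    intro a b h1 h2 h3 h
    have han : a < n := by omega
    rw [scanR, dif_pos han, if_pos (h a le_rfl (by omega))]
    exact ih (a + 1) b (by omega) h2 (by omega) (fun t ht1 ht2 => h t (by omega) ht2)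

lemma scanR_cases (nums : List Int) (n : Nat) (v : Int) :
    ∀ k r0, n - r0 = k →
    (scanR nums n v r0 = Int.ofNat n ∧ ∀ t, r0 ≤ t → t < n → v ≤ nums.getD t 0)
    ∨ (∃ j, r0 ≤ j ∧ j < n ∧ scanR nums n v r0 = Int.ofNat j ∧ nums.getD j 0 < v ∧
        ∀ t, r0 ≤ t → t < j → v ≤ nums.getD t 0) := by
  intro k
  induction k with
  | zero =>
    intro r0 hk
    exact Or.inl ⟨by rw [scanR, dif_neg (by omega)], fun t ht1 ht2 => by omega⟩
  | succ k ih =>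
    intro r0 hk
    have hr : r0 < n := by omega
    by_cases hc : v ≤ nums.getD r0 0
    · rcases ih (r0 + 1) (by omega) with ⟨heq, hall⟩ | ⟨j, hj1, hj2, heq, hjlt, hbtw⟩
      · refine Or.inl ⟨?_, ?_⟩
        · rw [scanR, dif_pos hr, if_pos hc]; exact heq
        · intro t ht1 ht2
          by_cases htr : t = r0
          · subst htr; exact hc
          · exact hall t (by omega) ht2
      · refine Or.inr ⟨j, by omega, hj2, ?_, hjlt, ?_⟩
        · rw [scanR, dif_pos hr, if_pos hc]; exact heq
        · intro t ht1 ht2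
          by_cases htr : t = r0
          · subst htr; exact hc
          · exact hbtw t (by omega) ht2
    · refine Or.inr ⟨r0, le_rfl, hr, ?_, lt_of_not_ge hc, fun t ht1 ht2 => by omega⟩
      rw [scanR, dif_pos hr, if_neg hc]

lemma jumpR_eq (nums right : List Int) (v : Int) (lo : Nat)
    (hr : ∀ j, lo ≤ j → j < nums.length →
      right.getD j 0 = scanR nums nums.length (nums.getD j 0) (j + 1)) :
    ∀ fuel (r : Nat), lo ≤ r → r ≤ nums.length → nums.length + 1 - r ≤ fuel →
    jumpR nums right v fuel ((r : Int)) = scanR nums nums.length v r := by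
  intro fuel
  induction fuel with
  | zero => intro r _ h2 h3; omega
  | succ fuel ih =>
    intro r h1 h2 h3
    rw [jumpR]
    by_cases hc : r < nums.length ∧ v ≤ nums.getD r 0
    · have hcast : ((r : Int)).toNat = r := by omega
      have hcond : ((r : Int)) < (nums.length : Int) ∧ v ≤ nums.getD ((r : Int)).toNat 0 := by
        refine ⟨by exact_mod_cast hc.1, ?_⟩
        rw [hcast]; exact hc.2
      rw [if_pos hcond, hcast, hr r h1 hc.1]
      rcases scanR_cases nums nums.length (nums.getD r 0) (nums.length - (r + 1)) (r + 1) rfl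
        with ⟨heq, hall⟩ | ⟨j, hj1, hj2, heq, hjlt, hbtw⟩
      · rw [Int.ofNat_eq_natCast] at heq
        rw [heq]
        have hskip : scanR nums nums.length v r = scanR nums nums.length v nums.length := by
          apply scanR_skip nums nums.length v (nums.length - r) r nums.length (by omega)
            le_rfl (by omega)
          intro t ht1 ht2
          by_cases htr : t = r
          · subst htr; exact hc.2
          · exact le_trans hc.2 (hall t (by omega) ht2)
        rw [hskip]
        have := ih nums.length (by omega) le_rfl (by omega)
        simpa using this
      · rw [Int.ofNat_eq_natCast] at heq
        rw [heq]
        have hskip : scanR nums nums.length v r = scanR nums nums.length v j := by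
          apply scanR_skip nums nums.length v (j - r) r j (by omega) (by omega) (by omega)
          intro t ht1 ht2
          by_cases htr : t = r
          · subst htr; exact hc.2
          · exact le_trans hc.2 (hbtw t (by omega) ht2)
        rw [hskip]
        have := ih j (by omega) (by omega) (by omega)
        simpa using this
    · rw [if_neg (by
        intro hx
        rcases hx with ⟨hx1, hx2⟩
        have : r < nums.length := by exact_mod_cast hx1
        have hcast : ((r : Int)).toNat = r := by omega
        rw [hcast] at hx2
        exact hc ⟨this, hx2⟩)]
      by_cases hrn : r < nums.length
      · have hnc : ¬ v ≤ nums.getD r 0 := fun hx => hc ⟨hrn, hx⟩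
        rw [scanR, dif_pos hrn, if_neg hnc]
        rfl
      · have : r = nums.length := by omega
        subst this
        rw [scanR, dif_neg hrn]
        rfl

lemma buildR_inv (nums : List Int) : ∀ t, t ≤ nums.length →
    (((List.range nums.length).reverse).take t).foldl
      (fun right i =>
        right.set i (jumpR nums right (nums.getD i 0) (nums.length - i) ((i : Int) + 1)))
      (List.replicate nums.length (Int.ofNat nums.length)) =
    (List.range nums.length).map (fun j => if nums.length - t ≤ j then
      scanR nums nums.length (nums.getD j 0) (j + 1) else Int.ofNat nums.length) := by
  intro t
  induction t with
  | zero =>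
    intro _
    apply List.ext_getElem
    · simp
    · intro k h1 h2
      have hkn : k < nums.length := by simpa using h1
      have hno : ¬ nums.length ≤ k := by omega
      simp [hno]
  | succ t ih =>
    intro h
    have htn : t < nums.length := h
    rw [show ((List.range nums.length).reverse).take (t + 1)
        = ordR nums.length t ++ [nums.length - 1 - t] from ordR_succ nums.length t htn]
    rw [show (((List.range nums.length).reverse).take t) = ordR nums.length t from rfl] at ih
    rw [List.foldl_append, ih (by omega), List.foldl_cons, List.foldl_nil]
    have hrcorr : ∀ j, nums.length - t ≤ j → j < nums.length →
        ((List.range nums.length).map (fun j => if nums.length - t ≤ j then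
          scanR nums nums.length (nums.getD j 0) (j + 1) else Int.ofNat nums.length)).getD j 0
        = scanR nums nums.length (nums.getD j 0) (j + 1) := by
      intro j hj1 hj2
      rw [getD_map_range _ nums.length j hj2, if_pos hj1]
    have hjump := jumpR_eq nums _ (nums.getD (nums.length - 1 - t) 0) (nums.length - t) hrcorr
      (nums.length - (nums.length - 1 - t)) (nums.length - 1 - t + 1) (by omega) (by omega)
      (by omega)
    have hcast : ((nums.length - 1 - t : Nat) : Int) + 1
        = ((nums.length - 1 - t + 1 : Nat) : Int) := by omega
    rw [hcast, hjump]
    apply List.ext_getElem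
    · simp
    · intro k h1 h2
      rw [List.getElem_set]
      simp only [List.getElem_map, List.getElem_range]
      by_cases hki : nums.length - 1 - t = k
      · subst hki; rw [if_pos rfl, if_pos (by omega)]
      · rw [if_neg hki]
        by_cases hki2 : nums.length - t ≤ k
        · rw [if_pos hki2, if_pos (by omega)]
        · rw [if_neg hki2, if_neg (by omega)]

lemma final_eq (nums : List Int) (threshold : Int) (n : Nat) :
    ∀ l : List Nat, (∀ j ∈ l, j < n) →
    finalLoop threshold (l.map (fun j => (nums.getD j 0, scanL nums (nums.getD j 0) j,
      scanR nums n (nums.getD j 0) (j + 1)))) =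
    altFinal nums threshold ((List.range n).map (fun j => scanL nums (nums.getD j 0) j))
      ((List.range n).map (fun j => scanR nums n (nums.getD j 0) (j + 1))) l := by
  intro l
  induction l with
  | nil => intro _; rfl
  | cons i rest ih =>
    intro hmem
    have hi : i < n := hmem i List.mem_cons_self
    simp only [List.map_cons, finalLoop, altFinal]
    rw [getD_map_range _ n i hi, getD_map_range _ n i hi,
      ih (fun j hj => hmem j (List.mem_cons_of_mem i hj))]

-- ===== VERDICT (by name: the statement is the Claim_ definition above) =====
theorem validSubarraySize_spec : Claim_equal_validSubarraySize := by
  unfold Claim_equal_validSubarraySize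
  intro nums threshold _
  unfold Spec_validSubarraySize validSubarraySize validSubarraySize_alt
  simp only
  have htake : ((List.range nums.length).reverse).take nums.length
      = (List.range nums.length).reverse := List.take_of_length_le (by simp)
  have hR := right_fold nums nums.length nums.length le_rfl
  rw [htake] at hR
  rw [left_fold nums nums.length nums.length le_rfl, hR]
  simp only
  have hLmap : (List.range nums.length).map (fun j => if j < nums.length then valL nums j else -1)
      = (List.range nums.length).map (fun j => scanL nums (nums.getD j 0) j) := by
    apply List.map_congr_left
    intro j hj
    rw [if_pos (List.mem_range.mp hj), valL_eq_scanL]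
  have hRmap : (List.range nums.length).map
        (fun j => if nums.length - nums.length ≤ j then valR nums nums.length j
          else Int.ofNat nums.length)
      = (List.range nums.length).map
        (fun j => scanR nums nums.length (nums.getD j 0) (j + 1)) := by
    apply List.map_congr_left
    intro j hj
    rw [if_pos (by omega), valR_eq_scanR]
  rw [hLmap, hRmap]
  have hzip : nums.zip
        (((List.range nums.length).map (fun j => scanL nums (nums.getD j 0) j)).zip
          ((List.range nums.length).map
            (fun j => scanR nums nums.length (nums.getD j 0) (j + 1))))
      = (List.range nums.length).map (fun j => (nums.getD j 0,
          scanL nums (nums.getD j 0) j, scanR nums nums.length (nums.getD j 0) (j + 1))) := by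
    apply List.ext_getElem
    · simp
    · intro k h1 h2
      have hk : k < nums.length := by simpa using h2
      simp [List.getElem_zip, List.getElem?_eq_getElem hk]
  rw [hzip]
  have hBL : buildL nums
      = (List.range nums.length).map (fun j => scanL nums (nums.getD j 0) j) := by
    unfold buildL
    rw [buildL_inv nums nums.length nums.length le_rfl]
    apply List.map_congr_left
    intro j hj
    rw [if_pos (List.mem_range.mp hj)]
  have hBR : buildR nums
      = (List.range nums.length).map
        (fun j => scanR nums nums.length (nums.getD j 0) (j + 1)) := by
    unfold buildR
    rw [show (List.range nums.length).reverse
        = ((List.range nums.length).reverse).take nums.length from htake.symm,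
      buildR_inv nums nums.length le_rfl]
    apply List.map_congr_left
    intro j hj
    rw [if_pos (by omega)]
  rw [hBL, hBR]
  exact final_eq nums threshold nums.length (List.range nums.length)
    (fun j hj => List.mem_range.mp hj)
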